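-- pv_equiv track=rewrite | github.com/tkim92/First_in_Gits- | school_exercies/exercise8/ex8b.py | reverseTel
-- ===== SOURCE A (Python) =====
-- def reverseTel(phonebook):
--     reverseone = {}
--
--     for i in phonebook:
--         if phonebook[i] in reverseone:
--             reverseone[phonebook[i]] += i
--         else:
--             reverseone[phonebook[i]] = i
--     return reverseone
-- ===== SOURCE B (Python) =====
-- def reverseTel(phonebook):
--     # pass 1: group keys by their value, in iteration order
--     groups = {}
--     for name, num in phonebook.items():
--         groups.setdefault(num, []).append(name)
--     # pass 2: reduce each group with + (no initializer: start from the first key)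
--     result = {}
--     for num, names in groups.items():
--         acc = names[0]
--         for name in names[1:]:
--             acc += name
--         result[num] = acc
--     return result
-- ===== Notes on version B (the rewrite author's own statement) =====
-- stated objective: alternative
-- what changed: A inverts the dict in one loop, accumulating concatenations inline per value; B first builds an ordered grouping dict value -> list of keys, then a second pass reduces each key-list with + (no initializer) into the result.
import Mathlib
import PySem

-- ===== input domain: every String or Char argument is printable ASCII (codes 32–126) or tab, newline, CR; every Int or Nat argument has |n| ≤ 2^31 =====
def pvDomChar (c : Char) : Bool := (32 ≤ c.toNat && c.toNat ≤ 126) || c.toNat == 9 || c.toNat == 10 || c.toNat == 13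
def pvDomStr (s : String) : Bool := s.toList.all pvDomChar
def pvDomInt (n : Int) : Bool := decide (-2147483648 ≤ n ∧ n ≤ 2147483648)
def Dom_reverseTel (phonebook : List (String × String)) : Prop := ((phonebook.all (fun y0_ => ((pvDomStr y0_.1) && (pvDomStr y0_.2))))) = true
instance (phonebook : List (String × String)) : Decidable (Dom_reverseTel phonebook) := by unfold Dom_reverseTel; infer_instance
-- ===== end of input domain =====

-- B inverts the dict in two passes (group keys by value, then reduce each group with +)
-- instead of A's single inline-accumulation loop; objective: alternative decomposition, same cost.

-- ===== PORT A =====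
def reverseTel (phonebook : List (String × String)) : List (String × String) :=
  (phonebook.foldl
    (fun reverseone kv =>
      -- phonebook[i]: i is a key of phonebook, so the lookup succeeds (getD default is never used)
      let num := (PySem.Dict.mk phonebook).getD kv.1 ""
      if reverseone.contains num then
        reverseone.insert num (reverseone.getD num "" ++ kv.1)  -- reverseone[phonebook[i]] += i
      else
        reverseone.insert num kv.1)                             -- reverseone[phonebook[i]] = i
    PySem.Dict.empty).items

-- ===== PORT B =====
-- reduce of a group with + and no initializer (groups are always nonempty)
def pvReduceAdd (names : List String) : String :=
  match names with
  | [] => ""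
  | n :: rest => rest.foldl (fun acc x => acc ++ x) n

def reverseTel_alt (phonebook : List (String × String)) : List (String × String) :=
  -- pass 1: groups.setdefault(num, []).append(name)
  let groups := phonebook.foldl
    (fun g kv => g.modify kv.2 [] (fun ns => ns ++ [kv.1])) PySem.Dict.empty
  -- pass 2: result[num] = reduce(+, names)
  (groups.items.foldl
    (fun res p => res.insert p.1 (pvReduceAdd p.2)) PySem.Dict.empty).items

-- ===== PRECONDITION & SPEC =====
-- Pre_ excludes association lists with duplicate keys: the Python argument is a dict, which cannot
-- hold a key twice, so such lists do not correspond to any dict input and the ports' first-match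
-- reading of them is accidental.
def Pre_reverseTel (phonebook : List (String × String)) : Prop :=
  (phonebook.map Prod.fst).Nodup
instance (phonebook : List (String × String)) : Decidable (Pre_reverseTel phonebook) := by
  unfold Pre_reverseTel; infer_instance
def pvWitness_reverseTel : (List (String × String)) :=
  [("alice", "123"), ("bob", "123"), ("carl", "456")]
def Spec_reverseTel (phonebook : List (String × String)) (out : List (String × String)) : Prop := out = reverseTel_alt phonebook
instance (phonebook : List (String × String)) (out : List (String × String)) : Decidable (Spec_reverseTel phonebook out) := by unfold Spec_reverseTel; infer_instance

-- ===== CLAIM (what is proved, stated in full; the proofs are below) =====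
def Claim_equal_reverseTel : Prop := ∀ (phonebook : List (String × String)), Dom_reverseTel phonebook → Pre_reverseTel phonebook → Spec_reverseTel phonebook (reverseTel phonebook)

-- ===== LEMMAS AND PROOFS =====

-- mapping the reduction over a grouping dict
def pvMapRed (g : PySem.Dict String (List String)) : PySem.Dict String String :=
  PySem.Dict.mk (g.items.map (fun p => (p.1, pvReduceAdd p.2)))

-- every group in the dict is nonempty
def pvGood (g : PySem.Dict String (List String)) : Prop := ∀ p ∈ g.items, p.2 ≠ []

theorem pv_contains_mapRed (g : PySem.Dict String (List String)) (k : String) :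
    (pvMapRed g).contains k = g.contains k := by
  simp [pvMapRed, PySem.Dict.contains, List.any_map, Function.comp_def]

theorem pv_get?_mapRed (g : PySem.Dict String (List String)) (k : String) :
    (pvMapRed g).get? k = (g.get? k).map pvReduceAdd := by
  simp [pvMapRed, PySem.Dict.get?, List.find?_map, Function.comp_def, Option.map_map]

theorem pv_insert_mapRed (g : PySem.Dict String (List String)) (k : String) (w : List String) :
    (pvMapRed g).insert k (pvReduceAdd w) = pvMapRed (g.insert k w) := by
  apply PySem.Dict.ext
  by_cases h : g.contains k = true
  · have h' : (pvMapRed g).contains k = true := by rw [pv_contains_mapRed]; exact h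
    rw [PySem.Dict.items_insert_of_contains _ _ h']
    show _ = (PySem.Dict.mk ((g.insert k w).items.map _)).items
    rw [PySem.Dict.items_insert_of_contains _ _ h]
    simp only [pvMapRed, List.map_map]
    apply List.map_congr_left
    intro p _
    by_cases hp : (p.1 == k) = true <;> simp [Function.comp, hp]
  · have h' : ¬ (pvMapRed g).contains k = true := by rw [pv_contains_mapRed]; exact h
    rw [PySem.Dict.items_insert_of_not_contains _ _ (by simpa using h')]
    show _ = (PySem.Dict.mk ((g.insert k w).items.map _)).items
    rw [PySem.Dict.items_insert_of_not_contains _ _ (by simpa using h)]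
    simp [pvMapRed]

theorem pv_reduceAdd_append (ks : List String) (x : String) (h : ks ≠ []) :
    pvReduceAdd (ks ++ [x]) = pvReduceAdd ks ++ x := by
  cases ks with
  | nil => exact absurd rfl h
  | cons n r => simp [pvReduceAdd, List.foldl_append]

theorem pv_good_insert (g : PySem.Dict String (List String)) (k : String) (v : List String)
    (hg : pvGood g) (hv : v ≠ []) : pvGood (g.insert k v) := by
  intro p hp
  rcases (PySem.Dict.mem_items_insert _ _ _ _).1 hp with h | ⟨h, _⟩
  · subst h; exact hv
  · exact hg p h

theorem pv_step_comm (g : PySem.Dict String (List String)) (hg : pvGood g)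
    (kv : String × String) :
    (if (pvMapRed g).contains kv.2 then
       (pvMapRed g).insert kv.2 ((pvMapRed g).getD kv.2 "" ++ kv.1)
     else (pvMapRed g).insert kv.2 kv.1)
    = pvMapRed (g.modify kv.2 [] (fun ns => ns ++ [kv.1])) := by
  rw [pv_contains_mapRed]
  by_cases h : g.contains kv.2 = true
  · obtain ⟨ks, hks⟩ : ∃ ks, g.get? kv.2 = some ks := by
      rw [PySem.Dict.contains_eq_isSome_get?] at h
      exact Option.isSome_iff_exists.1 h
    have hmem : (kv.2, ks) ∈ g.items := PySem.Dict.mem_items_of_get?_eq_some _ hks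
    have hne : ks ≠ [] := hg _ hmem
    have hgd : (pvMapRed g).getD kv.2 "" = pvReduceAdd ks := by
      simp [PySem.Dict.getD, pv_get?_mapRed, hks]
    have hgd' : g.getD kv.2 [] = ks := by simp [PySem.Dict.getD, hks]
    simp only [h, if_true, PySem.Dict.modify, hgd, hgd']
    rw [← pv_reduceAdd_append ks kv.1 hne, pv_insert_mapRed]
  · have hgd' : g.getD kv.2 [] = [] :=
      PySem.Dict.getD_of_not_contains _ _ (by simpa using h)
    simp only [h, PySem.Dict.modify, hgd', List.nil_append]
    calc (pvMapRed g).insert kv.2 kv.1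
        = (pvMapRed g).insert kv.2 (pvReduceAdd [kv.1]) := rfl
      _ = pvMapRed (g.insert kv.2 [kv.1]) := pv_insert_mapRed g kv.2 [kv.1]

theorem pv_fold_comm (l : List (String × String)) (g : PySem.Dict String (List String))
    (hg : pvGood g) :
    l.foldl (fun rev kv =>
        if rev.contains kv.2 then rev.insert kv.2 (rev.getD kv.2 "" ++ kv.1)
        else rev.insert kv.2 kv.1) (pvMapRed g)
    = pvMapRed (l.foldl (fun g kv => g.modify kv.2 [] (fun ns => ns ++ [kv.1])) g) := by
  induction l generalizing g with
  | nil => rfl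
  | cons kv t ih =>
    simp only [List.foldl_cons]
    rw [pv_step_comm g hg kv]
    exact ih _ (by
      simp only [PySem.Dict.modify]
      exact pv_good_insert _ _ _ hg (by simp))

theorem pv_groups_nodup (phonebook : List (String × String)) :
    (phonebook.foldl (fun g kv => g.modify kv.2 [] (fun ns => ns ++ [kv.1]))
      (PySem.Dict.empty : PySem.Dict String (List String))).keys.Nodup := by
  simp only [PySem.Dict.modify]
  exact PySem.Dict.nodup_keys_foldl_insert_key phonebook (fun kv => kv.2)
    (fun g kv => g.getD kv.2 [] ++ [kv.1]) _ PySem.Dict.nodup_keys_empty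

-- ===== VERDICT (by name: the statement is the Claim_ definition above) =====
theorem reverseTel_spec : Claim_equal_reverseTel := by
  intro phonebook _ hpre
  unfold Spec_reverseTel reverseTel reverseTel_alt
  -- B's second pass writes each group once at a fresh key: its result is the reduced grouping dict
  have hfresh := PySem.Dict.items_foldl_insert_fresh
    (phonebook.foldl (fun g kv => g.modify kv.2 [] (fun ns => ns ++ [kv.1]))
      (PySem.Dict.empty : PySem.Dict String (List String))).items
    (fun p => p.1) (fun p => pvReduceAdd p.2) PySem.Dict.empty
    (fun a _ => PySem.Dict.contains_empty _) (by simpa [PySem.Dict.keys] using pv_groups_nodup phonebook)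
  rw [hfresh]
  -- A's lookup phonebook[i] returns i's own value (keys are distinct)
  rw [PySem.List.foldl_congr_mem phonebook _
    (fun rev kv => if rev.contains kv.2 then rev.insert kv.2 (rev.getD kv.2 "" ++ kv.1)
                   else rev.insert kv.2 kv.1) _
    (fun acc kv hkv => by
      have : (PySem.Dict.mk phonebook).getD kv.1 "" = kv.2 :=
        PySem.Dict.getD_of_mem_items (PySem.Dict.mk phonebook)
          (by exact hkv) (by exact hpre) ""
      simp only [this])]
  -- A's loop is the grouping loop with the reduction mapped over it
  have : (PySem.Dict.empty : PySem.Dict String String) = pvMapRed PySem.Dict.empty := rfl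
  rw [this, pv_fold_comm phonebook PySem.Dict.empty (fun p hp => absurd hp (by simp [PySem.Dict.empty]))]
  rfl
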